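-- pv_equiv track=rewrite | github.com/prani354/gfgsolutions | Difficulty: Hard/Number of BST From Array/number-of-bst-from-array.py | countBSTs
-- ===== SOURCE A (Python) =====
-- def countBSTs(arr):
--     # Code here
--     #catalan numbers
--     n = len(arr)
--     cat = [0] * (n+1)
--
--     cat[0] = cat[1] = 1
--
--     for i in range(2,n+1):
--         for j in range(i):
--             cat[i] += cat[j] * cat[i-j-1]
--
--     s_arr = sorted(arr)
--     res = []
--
--     for num in arr:
--         idx = s_arr.index(num)
--         left_count = idx
--         right_count =  n - idx - 1
--
--         res.append(cat[left_count] * cat[right_count])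
--
--     return res
-- ===== SOURCE B (Python) =====
-- def countBSTs(arr):
--     n = len(arr)
--     # Catalan numbers by the O(n) multiplicative recurrence (exact integer division)
--     cat = [1]
--     for i in range(1, n):
--         cat.append(cat[-1] * 2 * (2 * i - 1) // (i + 1))
--     s = sorted(arr)
--     rank = {}
--     for i, v in enumerate(s):
--         if v not in rank:
--             rank[v] = i
--     return [cat[rank[v]] * cat[n - 1 - rank[v]] for v in arr]
-- ===== Notes on version B (the rewrite author's own statement) =====
-- stated objective: faster
-- what changed: Catalan numbers are computed by the O(n) multiplicative recurrence cat[i] = cat[i-1]*2*(2i-1)//(i+1) instead of the O(n^2) convolution, and the per-element s_arr.index scan is replaced by one dict of first sorted positions built in a single pass.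
-- outside the precondition, e.g. on countBSTs([]): A raises IndexError, B returns []
import Mathlib
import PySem

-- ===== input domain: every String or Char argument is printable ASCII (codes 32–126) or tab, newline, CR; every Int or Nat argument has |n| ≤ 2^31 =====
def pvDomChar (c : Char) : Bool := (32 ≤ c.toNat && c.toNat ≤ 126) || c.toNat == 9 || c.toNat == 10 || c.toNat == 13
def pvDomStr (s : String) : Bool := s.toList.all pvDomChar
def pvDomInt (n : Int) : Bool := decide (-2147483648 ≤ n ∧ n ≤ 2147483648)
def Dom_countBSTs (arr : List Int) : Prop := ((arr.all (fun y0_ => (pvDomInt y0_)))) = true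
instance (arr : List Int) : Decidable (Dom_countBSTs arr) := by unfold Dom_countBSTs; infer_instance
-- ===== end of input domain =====

-- B computes the Catalan table by the multiplicative recurrence and looks up sorted ranks
-- in a dict built once, replacing A's convolution and per-element .index scans (objective: faster).
-- Pre_ excludes only [] (A raises IndexError there).


-- ===== PORT A =====
-- inner loop 'for j in range(i): cat[i] += cat[j] * cat[i-j-1]'
def catInnerA (cat : List Int) (i : Int) : List Int :=
  (PySem.List.pyRange 0 i 1).foldl
    (fun c j => PySem.List.pySetD c i
      (PySem.List.pyGetD c i 0 + PySem.List.pyGetD c j 0 * PySem.List.pyGetD c (i - j - 1) 0))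
    cat

def countBSTs (arr : List Int) : List Int :=
  let n : Int := arr.length
  -- cat = [0]*(n+1); cat[0] = cat[1] = 1  (on arr = [] Python raises IndexError here: outside Pre_)
  let cat0 : List Int := List.replicate (arr.length + 1) 0
  let cat1 := PySem.List.pySetD (PySem.List.pySetD cat0 0 1) 1 1
  let cat := (PySem.List.pyRange 2 (n + 1) 1).foldl (fun c i => catInnerA c i) cat1
  let s_arr := PySem.List.sorted arr (fun x => x) false
  arr.foldl
    (fun res num =>
      match PySem.List.index? s_arr num with
      | some idx => res ++ [PySem.List.pyGetD cat (idx : Int) 0 * PySem.List.pyGetD cat (n - idx - 1) 0]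
      | none => res)   -- unreachable: num ∈ arr so .index never raises
    []

-- ===== PORT B =====
-- 'for i in range(1, n): cat.append(cat[-1] * 2 * (2*i - 1) // (i + 1))'
def catB (n : Int) : List Int :=
  (PySem.List.pyRange 1 n 1).foldl
    (fun c i => c ++ [PySem.Int.floordiv (PySem.List.pyGetD c (-1) 0 * 2 * (2 * i - 1)) (i + 1)])
    [1]

-- 'rank = {}; for i, v in enumerate(s): if v not in rank: rank[v] = i'
def rankB (s : List Int) : PySem.Dict Int Int :=
  (PySem.List.enumerate s 0).foldl
    (fun d p => if d.contains p.2 then d else d.insert p.2 p.1) PySem.Dict.empty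

def countBSTs_alt (arr : List Int) : List Int :=
  let n : Int := arr.length
  let cat := catB n
  let s := PySem.List.sorted arr (fun x => x) false
  let rank := rankB s
  arr.map (fun v =>
    let r := rank.getD v 0   -- rank[v]; v is always a key, the default is unreachable
    PySem.List.pyGetD cat r 0 * PySem.List.pyGetD cat (n - 1 - r) 0)

-- ===== PRECONDITION & SPEC =====
-- Pre_ excludes only the empty list, on which A raises IndexError (cat[1] = 1 into the length-1 array [0]); B returns [] there.
def Pre_countBSTs (arr : List Int) : Prop := arr ≠ []
instance (arr : List Int) : Decidable (Pre_countBSTs arr) := by unfold Pre_countBSTs; infer_instance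
def pvWitness_countBSTs : List Int := [2, 1, 2]

def Spec_countBSTs (arr : List Int) (out : List Int) : Prop := out = countBSTs_alt arr
instance (arr : List Int) (out : List Int) : Decidable (Spec_countBSTs arr out) := by unfold Spec_countBSTs; infer_instance

-- ===== CLAIM (what is proved, stated in full; the proofs are below) =====
def Claim_equal_countBSTs : Prop := ∀ (arr : List Int), Dom_countBSTs arr → Pre_countBSTs arr → Spec_countBSTs arr (countBSTs arr)

-- ===== LEMMAS AND PROOFS =====

-- (k+2)·C(k+1) = 2(2k+1)·C(k), from the central-binomial identities
lemma cat_mul (k : Nat) : (k + 2) * catalan (k + 1) = 2 * (2 * k + 1) * catalan k := by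
  have h1 := succ_mul_catalan_eq_centralBinom (k + 1)
  have h2 := Nat.succ_mul_centralBinom_succ k
  have h3 := succ_mul_catalan_eq_centralBinom k
  have hc : Nat.centralBinom (k + 1) = 2 * (2 * k + 1) * catalan k := by
    have h : (k + 1) * Nat.centralBinom (k + 1) = (k + 1) * (2 * (2 * k + 1) * catalan k) := by
      rw [h2, ← h3]; ring
    exact Nat.eq_of_mul_eq_mul_left (by omega) h
  rw [h1, hc]

lemma sum_map_range_eq_finset (n : Nat) (f : Nat → Int) :
    ((List.range n).map f).sum = ∑ x ∈ Finset.range n, f x := by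
  induction n with
  | zero => simp
  | succ m ih => rw [List.range_succ, Finset.sum_range_succ]; simp [ih]

-- the convolution A computes is the Catalan recurrence
lemma cat_conv (m : Nat) (hm : 1 ≤ m) :
    ((List.range m).map (fun j => (catalan j : Int) * (catalan (m - 1 - j) : Int))).sum
      = (catalan m : Int) := by
  obtain ⟨k, rfl⟩ : ∃ k, m = k + 1 := ⟨m - 1, by omega⟩
  rw [catalan_succ' k,
    Finset.Nat.sum_antidiagonal_eq_sum_range_succ (fun x y => catalan x * catalan y) k,
    sum_map_range_eq_finset]
  push_cast
  simp

-- B's exact-division step produces the next Catalan number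
lemma cat_div_step (k : Nat) :
    PySem.Int.floordiv ((catalan k : Int) * 2 * (2 * ((k : Int) + 1) - 1)) (((k : Int) + 1) + 1)
      = (catalan (k + 1) : Int) := by
  have h := cat_mul k
  rw [PySem.Int.floordiv_eq_ediv_of_pos (by omega)]
  have hnum : (catalan k : Int) * 2 * (2 * ((k : Int) + 1) - 1) = ((k : Int) + 2) * (catalan (k + 1) : Int) := by
    have h' : ((((k + 2) * catalan (k + 1) : Nat)) : Int) = (((2 * (2 * k + 1) * catalan k : Nat)) : Int) := by
      exact_mod_cast congrArg Nat.cast h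
    push_cast at h'
    linarith
  rw [hnum]
  have h2 : ((k : Int) + 1) + 1 = (k : Int) + 2 := by ring
  rw [h2, Int.mul_ediv_cancel_left _ (by omega)]

-- B's Catalan list is [C 0, …, C (n-1)]
lemma catB_eq (n : Nat) (hn : 1 ≤ n) :
    catB (n : Int) = (List.range n).map (fun k => (catalan k : Int)) := by
  induction n with
  | zero => omega
  | succ m ih =>
    rcases Nat.lt_or_ge m 1 with hm | hm
    · interval_cases m
      · show catB ((1:Nat) : Int) = _
        unfold catB
        rw [show ((1:Nat):Int) = 1 by norm_num, PySem.List.pyRange_one_eq_nil le_rfl]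
        simp [List.range_succ]
    · have hstep : PySem.List.pyRange 1 ((m : Int) + 1) 1 = PySem.List.pyRange 1 (m : Int) 1 ++ [(m : Int)] := by
        exact PySem.List.pyRange_one_succ_right (by exact_mod_cast hm)
      have hmap : ((m : Nat) : Int) + 1 = ((m + 1 : Nat) : Int) := by push_cast; ring
      unfold catB
      rw [← hmap, hstep, List.foldl_append]
      have hprev := ih hm
      unfold catB at hprev
      rw [hprev]
      have hne : (List.range m).map (fun k => (catalan k : Int)) ≠ [] := by
        simp only [ne_eq, List.map_eq_nil_iff, List.range_eq_nil]; omega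
      rw [List.foldl_cons, List.foldl_nil, PySem.List.pyGetD_neg_one _ _ hne]
      have hlast : ((List.range m).map (fun k => (catalan k : Int))).getLast hne = (catalan (m - 1) : Int) := by
        obtain ⟨j, rfl⟩ : ∃ j, m = j + 1 := ⟨m - 1, by omega⟩
        rw [List.getLast_eq_getElem]
        simp
      rw [hlast]
      obtain ⟨j, rfl⟩ : ∃ j, m = j + 1 := ⟨m - 1, by omega⟩
      have hc : ((j + 1 : Nat) : Int) = (j : Int) + 1 := by push_cast; ring
      have hR : List.range (j + 1 + 1) = List.range (j + 1) ++ [j + 1] := List.range_succ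
      have hR2 : List.range (j + 1) = List.range j ++ [j] := List.range_succ
      rw [hR, hR2, List.map_append, List.map_append, List.map_singleton, List.map_singleton]
      congr 1
      · simp
      · rw [show j + 1 - 1 = j from rfl, hc, cat_div_step j]

-- lookups in the first-occurrence rank dict are exactly list.index on the scanned list
lemma rank_fold (s : List Int) (d : PySem.Dict Int Int) (off : Int) (v : Int) :
    ((PySem.List.enumerate s off).foldl
        (fun d p => if d.contains p.2 then d else d.insert p.2 p.1) d).get? v
      = if d.contains v then d.get? v
        else (PySem.List.index? s v).map (fun k => off + (k : Int)) := by
  induction s generalizing d off with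
  | nil =>
    simp only [PySem.List.enumerate_nil, List.foldl_nil, PySem.List.index?_eq_idxOf?,
      List.idxOf?_nil]
    split_ifs with h
    · rfl
    · exact (PySem.Dict.get?_eq_none_iff_contains d v).mpr ((Bool.not_eq_true _).mp h)
  | cons x s ih =>
    rw [PySem.List.enumerate_cons, List.foldl_cons]
    by_cases hx : v = x
    · subst hx
      by_cases hc : d.contains v
      · simp only [hc, if_true, ih]
      · simp only [hc, if_false, Bool.false_eq_true]
        rw [ih]
        rw [PySem.Dict.contains_insert_self]
        simp only [if_true]
        rw [PySem.Dict.get?_insert_self, PySem.List.index?_cons_self]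
        simp
    · have hbody : (if d.contains x then d else d.insert x off) = d ∨
        (if d.contains x then d else d.insert x off) = d.insert x off := by
        split_ifs <;> simp
      rw [ih]
      have hidx : PySem.List.index? (x :: s) v = (PySem.List.index? s v).map (· + 1) :=
        PySem.List.index?_cons_of_ne s (Ne.symm hx)
      rw [hidx]
      rcases hbody with hb | hb <;> rw [hb]
      · cases hk : PySem.List.index? s v <;> simp <;> split_ifs <;>
          simp [hk] <;> push_cast <;> ring
      · rw [PySem.Dict.contains_insert, PySem.Dict.get?_insert_of_ne _ _ hx]
        have : (v == x) = false := by simp [hx]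
        rw [this]
        simp only [Bool.false_or]
        cases hk : PySem.List.index? s v <;> split_ifs <;> simp [hk] <;> push_cast <;> ring

lemma rankB_getD (s : List Int) (v : Int) (k : Nat) (hk : PySem.List.index? s v = some k) :
    (rankB s).getD v 0 = (k : Int) := by
  unfold rankB
  rw [PySem.Dict.getD_eq_get?_getD, rank_fold, PySem.Dict.contains_empty]
  have hk' : List.idxOf? v s = some k := by rw [PySem.List.index?_eq_idxOf?] at hk; exact hk
  simp [hk']

lemma getD_set_ne (c : List Int) (i k : Nat) (v : Int) (h : k ≠ i) :
    (c.set i v).getD k 0 = c.getD k 0 := by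
  rcases Nat.lt_or_ge k c.length with hk | hk
  · rw [List.getD_eq_getElem _ _ (by simpa using hk), List.getD_eq_getElem _ _ hk,
      List.getElem_set_ne (by omega)]
  · rw [List.getD_eq_default _ _ (by simpa using hk), List.getD_eq_default _ _ hk]

-- A's inner loop accumulates the convolution sum into cat[i]
lemma innerA_aux (c : List Int) (i : Nat) (hi : i < c.length) (t : Nat) (ht : t ≤ i) :
    (List.range t).foldl
        (fun acc (j : Nat) => PySem.List.pySetD acc (i : Int)
          (PySem.List.pyGetD acc (i : Int) 0 +
            PySem.List.pyGetD acc ((j : Nat) : Int) 0 *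
              PySem.List.pyGetD acc ((i : Int) - ((j : Nat) : Int) - 1) 0)) c
      = c.set i (c.getD i 0 + ((List.range t).map (fun j => c.getD j 0 * c.getD (i - 1 - j) 0)).sum) := by
  induction t with
  | zero =>
    simp only [List.range_zero, List.foldl_nil, List.map_nil, List.sum_nil, add_zero]
    rw [List.getD_eq_getElem _ _ hi]
    exact (List.set_getElem_self hi).symm
  | succ t ih =>
    have htle : t ≤ i := by omega
    have htlt : t < i := by omega
    rw [List.range_succ, List.foldl_append, ih htle, List.foldl_cons, List.foldl_nil]
    set X := c.getD i 0 + ((List.range t).map (fun j => c.getD j 0 * c.getD (i - 1 - j) 0)).sum with hX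
    have hlen : (c.set i X).length = c.length := by simp
    have hgi : PySem.List.pyGetD (c.set i X) (i : Int) 0 = X := by
      rw [PySem.List.pyGetD_natCast, List.getD_eq_getElem _ _ (by omega), List.getElem_set_self (by omega)]
    have hgt : PySem.List.pyGetD (c.set i X) ((t : Nat) : Int) 0 = c.getD t 0 := by
      rw [PySem.List.pyGetD_natCast]; exact getD_set_ne c i t X (by omega)
    have hidx : (i : Int) - ((t : Nat) : Int) - 1 = ((i - 1 - t : Nat) : Int) := by push_cast [Nat.cast_sub] <;> omega
    have hgm : PySem.List.pyGetD (c.set i X) ((i : Int) - ((t : Nat) : Int) - 1) 0 = c.getD (i - 1 - t) 0 := by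
      rw [hidx, PySem.List.pyGetD_natCast]; exact getD_set_ne c i _ X (by omega)
    rw [PySem.List.pySetD_natCast, hgi, hgt, hgm, List.set_set]
    congr 1
    rw [List.map_append, List.sum_append]
    simp only [List.map_cons, List.map_nil, List.sum_cons, List.sum_nil, add_zero, hX]
    ring

lemma catInnerA_eq (c : List Int) (m : Nat) (hm : m < c.length) :
    catInnerA c (m : Int)
      = c.set m (c.getD m 0 + ((List.range m).map (fun j => c.getD j 0 * c.getD (m - 1 - j) 0)).sum) := by
  unfold catInnerA
  rw [PySem.List.pyRange_zero_nat, List.foldl_map]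
  exact innerA_aux c m hm m le_rfl

def cat1 (n : Nat) : List Int :=
  PySem.List.pySetD (PySem.List.pySetD (List.replicate (n + 1) 0) 0 1) 1 1

-- A's outer loop fills the cat array with Catalan numbers
lemma outerA (n : Nat) (hn : 1 ≤ n) (m : Nat) (h2 : 2 ≤ m) (hmn : m ≤ n + 1) :
    (PySem.List.pyRange 2 (m : Int) 1).foldl catInnerA (cat1 n)
      = (List.range m).map (fun k => (catalan k : Int)) ++ List.replicate (n + 1 - m) 0 := by
  induction m with
  | zero => omega
  | succ m ih =>
    rcases Nat.lt_or_ge m 2 with hm | hm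
    · interval_cases m
      · omega
      · obtain ⟨k, rfl⟩ : ∃ k, n = k + 1 := ⟨n - 1, by omega⟩
        show (PySem.List.pyRange 2 ((2:Nat) : Int) 1).foldl catInnerA (cat1 (k+1)) = _
        rw [show (((2:Nat)) : Int) = 2 by norm_num, PySem.List.pyRange_one_eq_nil le_rfl, List.foldl_nil]
        unfold cat1
        rw [PySem.List.pySetD_of_nonneg _ _ (by norm_num), PySem.List.pySetD_of_nonneg _ _ (by norm_num)]
        norm_num
        rw [show k + 1 + 1 = k + 2 from rfl, List.replicate_succ, List.replicate_succ]
        simp [List.range_succ]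
    · have hcast : ((m + 1 : Nat) : Int) = (m : Int) + 1 := by push_cast; ring
      rw [hcast, PySem.List.pyRange_one_succ_right (by exact_mod_cast hm : (2:Int) ≤ (m:Int)), List.foldl_append,
        ih hm (by omega), List.foldl_cons, List.foldl_nil]
      set L := (List.range m).map (fun k => (catalan k : Int)) ++ List.replicate (n + 1 - m) 0 with hL
      have hlenL : L.length = n + 1 := by simp [hL]; omega
      rw [catInnerA_eq L m (by omega)]
      have hrep1 : List.replicate (n + 1 - m) (0 : Int) = 0 :: List.replicate (n - m) 0 := by
        rw [show n + 1 - m = (n - m) + 1 by omega, List.replicate_succ]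
      have hget_m : L.getD m 0 = 0 := by
        rw [hL, List.getD_append_right _ _ _ _ (by simp), hrep1]
        simp
      have hget_lt : ∀ j, j < m → L.getD j 0 = (catalan j : Int) := by
        intro j hj
        rw [hL, List.getD_append _ _ _ _ (by simpa using hj), PySem.List.getD_map_range _ _ _ _ hj]
      have hsum : ((List.range m).map (fun j => L.getD j 0 * L.getD (m - 1 - j) 0)).sum = (catalan m : Int) := by
        rw [List.map_congr_left (fun j hj => by
          rw [hget_lt j (List.mem_range.mp hj), hget_lt (m - 1 - j) (by have := List.mem_range.mp hj; omega)])]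
        exact cat_conv m (by omega)
      rw [hget_m, hsum, zero_add]
      rw [hL]
      rw [hrep1, List.set_append, if_neg (by simp)]
      simp only [List.length_map, List.length_range, Nat.sub_self, List.set_cons_zero]
      rw [List.range_succ, List.map_append, List.map_singleton]
      rw [show n + 1 - (m + 1) = n - m by omega]
      simp

lemma main_eq (arr : List Int) (h : arr ≠ []) : countBSTs arr = countBSTs_alt arr := by
  have hn1 : 1 ≤ arr.length := List.length_pos_iff.mpr h
  set n := arr.length with hn
  set s := PySem.List.sorted arr (fun x => x) false with hs
  have hslen : s.length = n := by rw [hs, PySem.List.length_sorted]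
  have hcast : ((n : Int) + 1) = ((n + 1 : Nat) : Int) := by push_cast; ring
  have hcatA : (PySem.List.pyRange 2 ((n : Int) + 1) 1).foldl (fun c i => catInnerA c i) (cat1 n)
      = (List.range (n + 1)).map (fun k => (catalan k : Int)) := by
    have ho := outerA n hn1 (n + 1) (by omega) le_rfl
    rw [hcast]
    simpa using ho
  set catL := (List.range (n + 1)).map (fun k => (catalan k : Int)) with hcatL
  have hA : countBSTs arr = arr.map (fun num =>
      PySem.List.pyGetD catL (((PySem.List.index? s num).getD 0 : Nat) : Int) 0 *
        PySem.List.pyGetD catL ((n : Int) - (((PySem.List.index? s num).getD 0 : Nat) : Int) - 1) 0) := by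
    unfold countBSTs
    simp only [← hn, ← hs, hcatA, ← hcatL]
    rw [PySem.List.foldl_congr_mem arr _
      (fun res num => res ++ [PySem.List.pyGetD catL (((PySem.List.index? s num).getD 0 : Nat) : Int) 0 *
        PySem.List.pyGetD catL ((n : Int) - (((PySem.List.index? s num).getD 0 : Nat) : Int) - 1) 0]) []
      (by
        intro acc num hnum
        have hmem : num ∈ s := by rw [hs, PySem.List.mem_sorted]; exact hnum
        obtain ⟨k, hk⟩ := Option.isSome_iff_exists.mp ((PySem.List.index?_isSome_iff _ _).mpr hmem)
        rw [hk]
        simp only [show PySem.List.pySetD (PySem.List.pySetD (List.replicate (n + 1) 0) 0 1) 1 1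
            = cat1 n from rfl, hcatA, Option.getD_some, hk])]
    rw [PySem.List.foldl_append_singleton_eq_map, List.nil_append]
  have hB : countBSTs_alt arr = arr.map (fun v =>
      PySem.List.pyGetD (catB (n : Int)) ((rankB s).getD v 0) 0 *
        PySem.List.pyGetD (catB (n : Int)) ((n : Int) - 1 - (rankB s).getD v 0) 0) := by
    unfold countBSTs_alt
    simp only [← hn, ← hs]
  rw [hA, hB]
  apply List.map_congr_left
  intro num hnum
  have hmem : num ∈ s := by rw [hs, PySem.List.mem_sorted]; exact hnum
  obtain ⟨k, hk⟩ := Option.isSome_iff_exists.mp ((PySem.List.index?_isSome_iff _ _).mpr hmem)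
  obtain ⟨hklt, -, -⟩ := PySem.List.getElem_of_index?_eq_some hk
  rw [hslen] at hklt
  have hrank : (rankB s).getD num 0 = (k : Int) := rankB_getD s num k hk
  have hcatB := catB_eq n hn1
  have hgA1 : PySem.List.pyGetD catL ((k : Nat) : Int) 0 = (catalan k : Int) := by
    rw [hcatL, PySem.List.pyGetD_natCast, PySem.List.getD_map_range _ _ _ _ (by omega)]
  have hi2 : (n : Int) - (k : Int) - 1 = ((n - 1 - k : Nat) : Int) := by push_cast [Nat.cast_sub] <;> omega
  have hgA2 : PySem.List.pyGetD catL ((n : Int) - (k : Int) - 1) 0 = (catalan (n - 1 - k) : Int) := by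
    rw [hi2, hcatL, PySem.List.pyGetD_natCast, PySem.List.getD_map_range _ _ _ _ (by omega)]
  have hgB1 : PySem.List.pyGetD (catB (n : Int)) ((k : Nat) : Int) 0 = (catalan k : Int) := by
    rw [hcatB, PySem.List.pyGetD_natCast, PySem.List.getD_map_range _ _ _ _ (by omega)]
  have hi2' : (n : Int) - 1 - (k : Int) = ((n - 1 - k : Nat) : Int) := by push_cast [Nat.cast_sub] <;> omega
  have hgB2 : PySem.List.pyGetD (catB (n : Int)) ((n : Int) - 1 - (k : Int)) 0 = (catalan (n - 1 - k) : Int) := by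
    rw [hi2', hcatB, PySem.List.pyGetD_natCast, PySem.List.getD_map_range _ _ _ _ (by omega)]
  rw [hk, hrank]
  simp only [Option.getD_some]
  rw [hgA1, hgA2, hgB1, hgB2]

-- ===== VERDICT (by name: the statement is the Claim_ definition above) =====
theorem countBSTs_spec : Claim_equal_countBSTs := by
  intro arr _ hpre
  unfold Spec_countBSTs
  exact main_eq arr hpre
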